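-- pv_equiv track=rewrite | github.com/luff543/Event-Source-Page-Discovery-Justine | src/RepeatPatternTool.py | ConstructTagPathDictionary
-- ===== SOURCE A (Python) =====
-- def ConstructTagPathDictionary(tagelems):
--     tagencodedict = {}
--     num = 0
--     for tmp in tagelems:
--         if str(tmp[0]) not in tagencodedict:
--             tagencodedict[str(tmp[0])] = chr(num)
--             num += 1
--     """self.tagencodeinversedict = {v: k for k, v in self.tagencodedict.items()}
--     self.tagstring = ''
--     for tag in self.tagelems:
--          self.tagstring += self.tagencodedict[str(tag[0])]"""
--     return tagencodedict
-- ===== SOURCE B (Python) =====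
-- def ConstructTagPathDictionary(tagelems):
--     keys = [str(tmp[0]) for tmp in tagelems]
--     return {k: chr(len(set(keys[:i])))
--             for i, k in enumerate(keys)
--             if k not in keys[:i]}
-- ===== Notes on version B (the rewrite author's own statement) =====
-- stated objective: alternative
-- what changed: Replaces A's stateful dict-and-counter loop with a stateless index-based dict comprehension: an element is kept iff its key is absent from the prefix keys[:i], and its code is chr of the number of distinct keys in that prefix, so no running dictionary or counter is maintained (trades O(n) for O(n^2) prefix rescans).
import Mathlib
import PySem

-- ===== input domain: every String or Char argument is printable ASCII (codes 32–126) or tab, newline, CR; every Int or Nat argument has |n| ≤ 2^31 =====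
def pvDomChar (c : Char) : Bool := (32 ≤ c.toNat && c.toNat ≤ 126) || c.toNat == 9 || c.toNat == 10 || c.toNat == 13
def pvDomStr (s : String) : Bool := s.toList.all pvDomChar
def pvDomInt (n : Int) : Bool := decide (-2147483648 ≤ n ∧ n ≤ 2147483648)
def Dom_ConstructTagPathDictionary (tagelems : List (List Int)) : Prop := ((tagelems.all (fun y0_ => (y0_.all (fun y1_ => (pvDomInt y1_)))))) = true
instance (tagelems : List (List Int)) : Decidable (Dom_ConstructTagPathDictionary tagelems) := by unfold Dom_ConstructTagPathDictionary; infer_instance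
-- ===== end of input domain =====

-- B replaces A's stateful dict-and-counter loop by a stateless index-based comprehension:
-- keep key i iff absent from keys[:i], code = chr(#distinct keys in keys[:i]); alternative decomposition, O(n^2) vs A's O(n).

-- shared trivial helpers (str(tmp[0]) and chr(i), exactly as both Pythons write them)
def pvKey (tmp : List Int) : String := PySem.Int.toStr ((PySem.List.pyGet? tmp 0).getD 0)
def pvChr (i : Int) : String := String.ofList [Char.ofNat i.toNat]

-- ===== PORT A =====
def ConstructTagPathDictionary (tagelems : List (List Int)) : List (String × String) :=
  ((tagelems.foldl
      (fun (st : PySem.Dict String String × Int) tmp =>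
        if st.1.contains (pvKey tmp) then st
        else (st.1.insert (pvKey tmp) (pvChr st.2), st.2 + 1))
      (PySem.Dict.empty, 0)).1).items

-- ===== PORT B =====
-- the dict comprehension's keys are pairwise distinct (each is kept only at its first
-- occurrence), so its items list is exactly the produced pairs in order.
def ConstructTagPathDictionary_alt (tagelems : List (List Int)) : List (String × String) :=
  let keys := tagelems.map pvKey
  ((PySem.List.enumerate keys 0).filter
      (fun p => !(PySem.List.slice keys none (some p.1)).contains p.2)).map
    (fun p => (p.2, pvChr ((PySem.Set.ofList (PySem.List.slice keys none (some p.1))).length : Int)))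

-- ===== PRECONDITION & SPEC =====
-- Pre_ excludes inputs containing an empty inner list, on which Python A raises IndexError at tmp[0].
def Pre_ConstructTagPathDictionary (tagelems : List (List Int)) : Prop :=
  ∀ tmp ∈ tagelems, tmp ≠ []
instance (tagelems : List (List Int)) : Decidable (Pre_ConstructTagPathDictionary tagelems) := by
  unfold Pre_ConstructTagPathDictionary; infer_instance

def pvWitness_ConstructTagPathDictionary : List (List Int) := [[1, 2], [2], [1], [3]]

def Spec_ConstructTagPathDictionary (tagelems : List (List Int)) (out : List (String × String)) : Prop := out = ConstructTagPathDictionary_alt tagelems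
instance (tagelems : List (List Int)) (out : List (String × String)) : Decidable (Spec_ConstructTagPathDictionary tagelems out) := by unfold Spec_ConstructTagPathDictionary; infer_instance

-- ===== CLAIM (what is proved, stated in full; the proofs are below) =====
def Claim_equal_ConstructTagPathDictionary : Prop := ∀ (tagelems : List (List Int)), Dom_ConstructTagPathDictionary tagelems → Pre_ConstructTagPathDictionary tagelems → Spec_ConstructTagPathDictionary tagelems (ConstructTagPathDictionary tagelems)

-- ===== LEMMAS AND PROOFS =====

-- the canonical dict A has built after having seen exactly the distinct keys ks, in order
def pvG (ks : List String) : PySem.Dict String String :=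
  PySem.Dict.mk ((PySem.List.enumerate ks 0).map (fun p => (p.2, pvChr p.1)))

theorem pvG_keys (ks : List String) : (pvG ks).keys = ks := by
  simp [pvG, PySem.Dict.keys, List.map_map, Function.comp_def, PySem.List.map_snd_enumerate]

theorem pvG_contains (ks : List String) (k : String) :
    (pvG ks).contains k = decide (k ∈ ks) := by
  rw [PySem.Dict.contains_eq_decide_mem_keys, pvG_keys]

theorem pvG_snoc (ks : List String) (k : String) (hk : k ∉ ks) :
    (pvG ks).insert k (pvChr (ks.length : Int)) = pvG (ks ++ [k]) := by
  apply PySem.Dict.ext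
  rw [PySem.Dict.items_insert_of_not_contains]
  · simp [pvG, PySem.List.enumerate_append, PySem.List.enumerate_cons]
  · rw [pvG_contains]; simp [hk]

theorem pvLoop_invariant (L : List (List Int)) (ks : List String) :
    L.foldl
      (fun (st : PySem.Dict String String × Int) tmp =>
        if st.1.contains (pvKey tmp) then st
        else (st.1.insert (pvKey tmp) (pvChr st.2), st.2 + 1))
      (pvG ks, (ks.length : Int))
    = (pvG (PySem.Set.update ks (L.map pvKey)),
       ((PySem.Set.update ks (L.map pvKey)).length : Int)) := by
  induction L generalizing ks with
  | nil => simp [PySem.Set.update]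
  | cons tmp L ih =>
    simp only [List.foldl_cons, pvG_contains]
    by_cases h : pvKey tmp ∈ ks
    · simp only [h, decide_true, if_true]
      rw [ih ks]
      have : PySem.Set.add ks (pvKey tmp) = ks := by
        simp [PySem.Set.add, PySem.Set.contains, h]
      simp [PySem.Set.update, List.map_cons, this]
    · simp only [h, decide_false]
      rw [if_neg (by simp), pvG_snoc ks _ h,
        show ((ks.length : Int) + 1) = (((ks ++ [pvKey tmp]).length : Int)) by simp, ih]
      have : PySem.Set.add ks (pvKey tmp) = ks ++ [pvKey tmp] := by
        simp [PySem.Set.add, PySem.Set.contains, h]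
      simp [PySem.Set.update, List.map_cons, this]

theorem pvG_nil : pvG [] = PySem.Dict.empty := by
  apply PySem.Dict.ext
  simp [pvG, PySem.List.enumerate_nil, PySem.Dict.empty]

-- A's loop builds exactly the canonical dict of the distinct keys in order
theorem pvA_eq (tagelems : List (List Int)) :
    ConstructTagPathDictionary tagelems
    = (pvG (PySem.Set.ofList (tagelems.map pvKey))).items := by
  unfold ConstructTagPathDictionary
  rw [← pvG_nil, show (0 : Int) = ((List.length ([] : List String) : Int)) by simp,
      pvLoop_invariant]
  simp [PySem.Set.update_nil_left]

-- one step of B's comprehension, peeled at the right end of keys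
theorem pvB_step (ks : List String) (k : String) :
    ((PySem.List.enumerate (ks ++ [k]) 0).filter
        (fun p => !(PySem.List.slice (ks ++ [k]) none (some p.1)).contains p.2)).map
      (fun p => (p.2, pvChr ((PySem.Set.ofList (PySem.List.slice (ks ++ [k]) none (some p.1))).length : Int)))
    = (((PySem.List.enumerate ks 0).filter
        (fun p => !(PySem.List.slice ks none (some p.1)).contains p.2)).map
      (fun p => (p.2, pvChr ((PySem.Set.ofList (PySem.List.slice ks none (some p.1))).length : Int))))
      ++ (if k ∈ ks then [] else [(k, pvChr ((PySem.Set.ofList ks).length : Int))]) := by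
  rw [PySem.List.enumerate_append, List.filter_append, List.map_append]
  congr 1
  · have hcong : ∀ p ∈ PySem.List.enumerate ks 0,
        PySem.List.slice (ks ++ [k]) none (some p.1) = PySem.List.slice ks none (some p.1) := by
      intro p hp
      rcases (PySem.List.mem_enumerate_iff ks 0 p).1 hp with ⟨j, hj, rfl⟩
      simp only [zero_add, PySem.List.slice_to_natCast]
      exact List.take_append_of_le_length (le_of_lt hj)
    rw [List.filter_congr (by intro p hp; rw [hcong p hp])]
    apply List.map_congr_left
    intro p hp
    rw [hcong p (List.mem_of_mem_filter hp)]
  · simp only [zero_add, PySem.List.enumerate_cons, PySem.List.enumerate_nil]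
    have hslice : PySem.List.slice (ks ++ [k]) none (some ((ks.length : Int))) = ks := by
      rw [PySem.List.slice_to_natCast]; simp
    simp only [List.filter, hslice]
    by_cases h : k ∈ ks
    · simp [h]
    · simp [h]

-- B's stateless comprehension over keys equals the items of the canonical dict of set(keys)
theorem pvB_eq (keys : List String) :
    ((PySem.List.enumerate keys 0).filter
        (fun p => !(PySem.List.slice keys none (some p.1)).contains p.2)).map
      (fun p => (p.2, pvChr ((PySem.Set.ofList (PySem.List.slice keys none (some p.1))).length : Int)))
    = (PySem.List.enumerate (PySem.Set.ofList keys) 0).map (fun p => (p.2, pvChr p.1)) := by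
  induction keys using List.reverseRecOn with
  | nil => simp [PySem.List.enumerate_nil, PySem.Set.ofList_nil]
  | append_singleton ks k ih =>
    rw [pvB_step, ih, PySem.Set.ofList_append_singleton]
    by_cases h : k ∈ ks
    · have : PySem.Set.add (PySem.Set.ofList ks) k = PySem.Set.ofList ks := by
        simp [PySem.Set.add, PySem.Set.contains, PySem.Set.mem_ofList, h]
      simp [h, PySem.Set.add, PySem.Set.contains, PySem.Set.mem_ofList]
    · have : PySem.Set.add (PySem.Set.ofList ks) k = PySem.Set.ofList ks ++ [k] := by
        simp [PySem.Set.add, PySem.Set.contains, PySem.Set.mem_ofList, h]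
      rw [this, PySem.List.enumerate_append, List.map_append]
      simp [h, PySem.List.enumerate_cons, PySem.List.enumerate_nil]

-- ===== VERDICT (by name: the statement is the Claim_ definition above) =====
theorem ConstructTagPathDictionary_spec : Claim_equal_ConstructTagPathDictionary := by
  intro tagelems _ _
  unfold Spec_ConstructTagPathDictionary
  simp only [ConstructTagPathDictionary_alt]
  rw [pvA_eq, pvB_eq]
  simp [pvG]
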